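-- pv_equiv track=rewrite | github.com/weighing-331/- | 全部爆開遞迴.py | nei
-- ===== SOURCE A (Python) =====
-- def nei(s):
--     char_count = {}
--     for char in s:
--         char_count[char] = char_count.get(char, 0) + 1
--     neig = 1
--     for i in range(1, len(char_count)+1):
--         neig *= i
--     return neig
-- ===== SOURCE B (Python) =====
-- def nei(s):
--     chars = sorted(s)
--     count = 0
--     prev = None
--     for c in chars:
--         if prev is None or c != prev:
--             count += 1
--         prev = c
--     neig = 1
--     for i in range(2, count + 1):
--         neig *= i
--     return neig
-- ===== Notes on version B (the rewrite author's own statement) =====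
-- stated objective: alternative
-- what changed: B counts distinct characters by sorting the string and scanning adjacent positions for changes (instead of building a frequency dict) and starts the factorial product at 2 instead of 1.
import Mathlib
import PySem

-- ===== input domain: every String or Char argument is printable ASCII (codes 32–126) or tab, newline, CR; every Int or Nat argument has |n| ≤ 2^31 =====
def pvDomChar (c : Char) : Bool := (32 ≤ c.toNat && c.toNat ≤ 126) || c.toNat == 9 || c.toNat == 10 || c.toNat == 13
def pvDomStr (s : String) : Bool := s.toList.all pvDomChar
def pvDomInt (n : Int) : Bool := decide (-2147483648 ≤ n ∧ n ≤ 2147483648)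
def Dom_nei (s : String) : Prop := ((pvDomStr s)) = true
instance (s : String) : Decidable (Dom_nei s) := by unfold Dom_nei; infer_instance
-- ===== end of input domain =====

-- B counts distinct characters by sorting and scanning for adjacent changes (A builds a
-- frequency dict); same return value, alternative algorithm (no speed claim).

-- ===== PORT A =====
def nei (s : String) : Int :=
  let char_count := s.toList.foldl
    (fun (d : PySem.Dict Char Int) c => d.insert c (d.getD c 0 + 1)) PySem.Dict.empty
  (PySem.List.pyRange 1 ((char_count.size : Int) + 1) 1).foldl (fun neig i => neig * i) 1

-- ===== PORT B =====
def nei_alt (s : String) : Int :=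
  let chars := PySem.List.sorted s.toList (fun c => c) false
  let st := chars.foldl
    (fun (st : Int × Option Char) c =>
      ((if st.2 = none ∨ st.2 ≠ some c then st.1 + 1 else st.1), some c))
    ((0 : Int), (none : Option Char))
  (PySem.List.pyRange 2 (st.1 + 1) 1).foldl (fun neig i => neig * i) 1

-- ===== PRECONDITION & SPEC =====
def Spec_nei (s : String) (out : Int) : Prop := out = nei_alt s
instance (s : String) (out : Int) : Decidable (Spec_nei s out) := by unfold Spec_nei; infer_instance

-- ===== CLAIM (what is proved, stated in full; the proofs are below) =====
def Claim_equal_nei : Prop := ∀ (s : String), Dom_nei s → Spec_nei s (nei s)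

-- ===== LEMMAS AND PROOFS =====

/-- The running count of B's scan, as a recursion over the remaining characters. -/
def cntB (prev : Option Char) : List Char → Int
  | [] => 0
  | c :: rest => (if prev = none ∨ prev ≠ some c then 1 else 0) + cntB (some c) rest

lemma foldlB_eq_cntB (l : List Char) (a : Int) (prev : Option Char) :
    (l.foldl (fun (st : Int × Option Char) c =>
      ((if st.2 = none ∨ st.2 ≠ some c then st.1 + 1 else st.1), some c)) (a, prev)).1
    = a + cntB prev l := by
  induction l generalizing a prev with
  | nil => simp [cntB]
  | cons c rest ih =>
    simp only [List.foldl_cons, cntB, ih]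
    split_ifs <;> ring

lemma cntB_some_sorted (l : List Char) (p : Char)
    (h : (p :: l).Pairwise (· ≤ ·)) :
    cntB (some p) l = ((p :: l).toFinset.card : Int) - 1 := by
  induction l generalizing p with
  | nil => simp [cntB]
  | cons c rest ih =>
    have hpc : p ≤ c := (List.pairwise_cons.1 h).1 c (by simp)
    have htail : (c :: rest).Pairwise (· ≤ ·) := (List.pairwise_cons.1 h).2
    by_cases hc : p = c
    · subst hc
      have := ih p htail
      simp only [cntB]
      rw [if_neg (by simp), this]
      simp
    · have hnotmem : p ∉ (c :: rest) := by
        intro hmem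
        rcases List.mem_cons.1 hmem with h1 | h2
        · exact hc h1
        · have hcp : c ≤ p := (List.pairwise_cons.1 htail).1 p h2
          exact hc (le_antisymm hpc hcp)
      have hcard : (p :: c :: rest).toFinset.card = (c :: rest).toFinset.card + 1 := by
        simp only [List.toFinset_cons (a := p)]
        exact Finset.card_insert_of_notMem (by simpa using hnotmem)
      have := ih c htail
      simp only [cntB]
      rw [if_pos (Or.inr (by simpa using hc)), this, hcard]
      push_cast
      ring
lemma cntB_none_sorted (l : List Char) (h : l.Pairwise (· ≤ ·)) :
    cntB none l = (l.toFinset.card : Int) := by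
  cases l with
  | nil => simp [cntB]
  | cons c rest =>
    simp only [cntB]
    rw [if_pos (by simp), cntB_some_sorted rest c h]
    ring

/-- The factorial product loop may start at 2 instead of 1. -/
lemma fact_start_two (n : Nat) :
    (PySem.List.pyRange 1 ((n : Int) + 1) 1).foldl (fun neig i => neig * i) 1
    = (PySem.List.pyRange 2 ((n : Int) + 1) 1).foldl (fun neig i => neig * i) 1 := by
  rcases Nat.eq_zero_or_pos n with h | h
  · subst h
    rw [PySem.List.pyRange_one_eq_nil (by norm_num), PySem.List.pyRange_one_eq_nil (by norm_num)]
  · rw [PySem.List.pyRange_one_cons (by exact_mod_cast Nat.lt_add_one_of_le h)]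
    simp

lemma set_ofList_length (xs : List Char) :
    (PySem.Set.ofList xs).length = xs.toFinset.card := by
  have hfs : (PySem.Set.ofList xs).toFinset = xs.toFinset := by
    ext x; simp [PySem.Set.mem_ofList]
  rw [← hfs, List.toFinset_card_of_nodup (PySem.Set.nodup_ofList xs)]

-- ===== VERDICT (by name: the statement is the Claim_ definition above) =====
theorem nei_spec : Claim_equal_nei := by
  intro s _
  unfold Spec_nei nei nei_alt
  -- A's dict size is the number of distinct characters
  have hkeys : (s.toList.foldl
      (fun (d : PySem.Dict Char Int) c => d.insert c (d.getD c 0 + 1)) PySem.Dict.empty).keys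
      = PySem.Set.ofList s.toList := by
    rw [PySem.Dict.keys_foldl_insert]
    simp [PySem.Set.update, PySem.Set.ofList_eq_foldl, PySem.Dict.keys, PySem.Dict.empty]
  have hsize : (s.toList.foldl
      (fun (d : PySem.Dict Char Int) c => d.insert c (d.getD c 0 + 1)) PySem.Dict.empty).size
      = s.toList.toFinset.card := by
    have : (s.toList.foldl
        (fun (d : PySem.Dict Char Int) c => d.insert c (d.getD c 0 + 1)) PySem.Dict.empty).size
        = (s.toList.foldl
        (fun (d : PySem.Dict Char Int) c => d.insert c (d.getD c 0 + 1)) PySem.Dict.empty).keys.length := by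
      simp [PySem.Dict.size, PySem.Dict.keys]
    rw [this, hkeys, set_ofList_length]
  -- B's scan counts the distinct characters of the sorted list
  have hperm := PySem.List.sorted_perm s.toList (fun c => c) false
  have hsortfs : (PySem.List.sorted s.toList (fun c => c) false).toFinset = s.toList.toFinset :=
    List.toFinset_eq_of_perm _ _ hperm
  have hpw : (PySem.List.sorted s.toList (fun c => c) false).Pairwise (· ≤ ·) := by
    simpa using PySem.List.sorted_pairwise s.toList (fun c => c)
  have hcnt : ((PySem.List.sorted s.toList (fun c => c) false).foldl
      (fun (st : Int × Option Char) c =>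
        ((if st.2 = none ∨ st.2 ≠ some c then st.1 + 1 else st.1), some c))
      ((0 : Int), (none : Option Char))).1 = (s.toList.toFinset.card : Int) := by
    rw [foldlB_eq_cntB, cntB_none_sorted _ hpw, hsortfs]; ring
  simp only [hsize, hcnt]
  exact fact_start_two s.toList.toFinset.card
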